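-- pv_equiv track=rewrite | github.com/Dagun2000/Bus-Onda | ai-vision/testfinalocr.py | postprocess_digits
-- ===== SOURCE A (Python) =====
-- def postprocess_digits(s: str):
--     """숫자만 남기고, 과도 반복 축약, 길이 1~5 허용(6 이상이면 앞 5자리만)."""
--     s = ''.join(ch for ch in s if ch.isdigit())
--     if not s:
--         return s
--     # 과도 반복 축약(같은 숫자 3연속 이상 → 2개로 축약)
--     out = []
--     for ch in s:
--         if len(out) >= 2 and out[-1] == ch and out[-2] == ch:
--             continue
--         out.append(ch)
--     s = ''.join(out)
--     # 최대 길이 5로 제한(1~5 허용)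
--     if len(s) > 5:
--         s = s[:5]
--     return s
-- ===== SOURCE B (Python) =====
-- def postprocess_digits(s: str):
--     """Keep digits, collapse each run of equal digits to at most 2, keep first 5."""
--     digits = ''.join(ch for ch in s if ch.isdigit())
--     if not digits:
--         return digits
--     pieces = []
--     i = 0
--     n = len(digits)
--     while i < n:
--         j = i
--         while j < n and digits[j] == digits[i]:
--             j += 1
--         pieces.append(digits[i] * min(2, j - i))
--         i = j
--     return ''.join(pieces)[:5]
-- ===== Notes on version B (the rewrite author's own statement) =====
-- stated objective: alternative
-- what changed: B collapses repeats by run-length grouping (scan each maximal run once, emit min(2, run length) copies) and always truncates with a slice, instead of A's per-character loop that inspects the last two appended characters.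
import Mathlib
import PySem

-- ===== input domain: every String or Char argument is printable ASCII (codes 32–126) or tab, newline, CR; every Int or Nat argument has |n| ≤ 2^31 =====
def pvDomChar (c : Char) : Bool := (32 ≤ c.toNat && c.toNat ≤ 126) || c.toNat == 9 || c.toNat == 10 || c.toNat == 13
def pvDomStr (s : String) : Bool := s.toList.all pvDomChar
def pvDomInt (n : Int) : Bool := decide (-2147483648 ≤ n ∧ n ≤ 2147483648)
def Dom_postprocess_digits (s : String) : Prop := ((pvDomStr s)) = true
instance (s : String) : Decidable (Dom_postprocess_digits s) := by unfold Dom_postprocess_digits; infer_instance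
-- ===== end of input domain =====

-- B collapses repeated digits by run-length grouping (one scan per maximal run, emitting
-- min(2, run length) copies) instead of A's per-character loop inspecting the last two
-- appended characters; same cost, alternative structure.

-- ===== PORT A =====
def postprocess_digits (s : String) : String :=
  -- s = ''.join(ch for ch in s if ch.isdigit())
  let s1 := s.toList.filter (fun ch => PySem.Chars.isdigit ch)
  if s1 = [] then String.mk s1
  else
    -- out = []; for ch in s: if len(out) >= 2 and out[-1] == ch and out[-2] == ch: continue; out.append(ch)
    let out := s1.foldl (fun out ch =>
      if 2 ≤ out.length ∧ PySem.List.pyGet? out (-1) = some ch ∧ PySem.List.pyGet? out (-2) = some ch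
      then out
      else out ++ [ch]) []
    -- if len(s) > 5: s = s[:5]
    if 5 < out.length then String.mk (PySem.List.slice out none (some 5)) else String.mk out

-- ===== PORT B =====
-- inner 'while j < n and digits[j] == digits[i]' of Source B: length of the run of c at the front
def runLen_B (c : Char) : List Char → Nat
  | [] => 0
  | x :: xs => if x = c then runLen_B c xs + 1 else 0

-- outer 'while i < n' of Source B: emit min(2, run) copies of the run's digit, jump past the run
def collapseRuns_B : List Char → List Char
  | [] => []
  | c :: cs =>
    List.replicate (min 2 (runLen_B c cs + 1)) c ++ collapseRuns_B (cs.drop (runLen_B c cs))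
termination_by l => l.length
decreasing_by simp

def postprocess_digits_alt (s : String) : String :=
  let digits := s.toList.filter (fun ch => PySem.Chars.isdigit ch)
  if digits = [] then String.mk digits
  else String.mk ((collapseRuns_B digits).take 5)

-- ===== PRECONDITION & SPEC =====
def Spec_postprocess_digits (s : String) (out : String) : Prop := out = postprocess_digits_alt s
instance (s : String) (out : String) : Decidable (Spec_postprocess_digits s out) := by unfold Spec_postprocess_digits; infer_instance

-- ===== CLAIM (what is proved, stated in full; the proofs are below) =====
def Claim_equal_postprocess_digits : Prop := ∀ (s : String), Dom_postprocess_digits s → Spec_postprocess_digits s (postprocess_digits s)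

-- ===== LEMMAS AND PROOFS =====

-- state abstraction for A's loop: last appended char, and whether the last two are equal
def lastEq : Option (Char × Bool) → Char → Bool
  | none, _ => false
  | some (a, _), c => a == c

def collapse2 : Option (Char × Bool) → List Char → List Char
  | _, [] => []
  | st, c :: cs =>
    if st = some (c, true) then collapse2 st cs
    else c :: collapse2 (some (c, lastEq st c)) cs

def st2 (out : List Char) : Option (Char × Bool) :=
  match out.getLast?, out.dropLast.getLast? with
  | none, _ => none
  | some a, none => some (a, false)
  | some a, some b => some (a, b == a)

theorem st2_append (out : List Char) (c : Char) :
    st2 (out ++ [c]) = some (c, lastEq (st2 out) c) := by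
  unfold st2 lastEq
  rw [List.getLast?_concat, List.dropLast_concat]
  cases h : out.getLast? with
  | none =>
    simp [List.getLast?_eq_none_iff.mp h]
  | some a =>
    cases out.dropLast.getLast? <;> simp

theorem cond_iff (out : List Char) (c : Char) :
    (2 ≤ out.length ∧ PySem.List.pyGet? out (-1) = some c ∧ PySem.List.pyGet? out (-2) = some c)
      ↔ st2 out = some (c, true) := by
  induction out using List.reverseRecOn with
  | nil => simp [st2, PySem.List.pyGet?, PySem.List.pyIdx?]
  | append_singleton ys a _ =>
    induction ys using List.reverseRecOn with
    | nil =>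
      simp [st2, PySem.List.pyGet?, PySem.List.pyIdx?]
    | append_singleton zs b _ =>
      have hlen : ((zs ++ [b]) ++ [a]).length = zs.length + 2 := by simp
      have h1 : PySem.List.pyGet? ((zs ++ [b]) ++ [a]) (-1) = some a := by
        simp [PySem.List.pyGet?_neg_one]
      have h2 : PySem.List.pyGet? ((zs ++ [b]) ++ [a]) (-2) = some b := by
        rw [PySem.List.pyGet?_neg_ofNat _ 2 (by omega) (by omega)]
        rw [hlen]
        simp [List.append_assoc]
      rw [st2_append, st2_append]
      simp only [lastEq]
      constructor
      · rintro ⟨-, ha, hb⟩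
        rw [h1] at ha; rw [h2] at hb
        cases ha; cases hb
        simp
      · intro h
        simp only [Option.some.injEq, Prod.mk.injEq, beq_iff_eq] at h
        obtain ⟨hac, hba⟩ := h
        subst hac; subst hba
        exact ⟨by simp, by rw [h1], by rw [h2]⟩

theorem foldA (cs : List Char) (out : List Char) :
    cs.foldl (fun out ch =>
      if 2 ≤ out.length ∧ PySem.List.pyGet? out (-1) = some ch ∧ PySem.List.pyGet? out (-2) = some ch
      then out else out ++ [ch]) out = out ++ collapse2 (st2 out) cs := by
  induction cs generalizing out with
  | nil => simp [collapse2]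
  | cons c cs ih =>
    simp only [List.foldl_cons]
    by_cases h : st2 out = some (c, true)
    · rw [if_pos ((cond_iff out c).mpr h), ih, collapse2, if_pos h, h]
    · rw [if_neg (fun hc => h ((cond_iff out c).mp hc)), ih, st2_append,
        collapse2, if_neg h]
      simp

theorem collapse2_fresh (l : List Char) (c : Char) (b : Bool) (h : l.head? ≠ some c) :
    collapse2 (some (c, b)) l = collapse2 none l := by
  cases l with
  | nil => rfl
  | cons d ds =>
    have hdc : d ≠ c := fun he => h (by simp [he])
    have hcd : (c == d) = false := beq_eq_false_iff_ne.mpr (fun he => hdc he.symm)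
    rw [collapse2, if_neg (by simp; intro he; exact absurd he.symm hdc),
        collapse2, if_neg (by simp)]
    simp [lastEq, hcd]

theorem collapse2_skip (c : Char) (l : List Char) :
    collapse2 (some (c, true)) l = collapse2 (some (c, true)) (l.drop (runLen_B c l)) := by
  induction l with
  | nil => rfl
  | cons d ds ih =>
    by_cases h : d = c
    · subst h
      rw [runLen_B, if_pos rfl, collapse2, if_pos rfl, ih]
      simp
    · rw [runLen_B, if_neg h]
      simp
theorem head_drop_runLen (c : Char) (l : List Char) :
    (l.drop (runLen_B c l)).head? ≠ some c := by
  induction l with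
  | nil => simp
  | cons d ds ih =>
    by_cases h : d = c
    · subst h; rw [runLen_B, if_pos rfl]; simpa using ih
    · rw [runLen_B, if_neg h]; simp [h]

theorem collapseRuns_eq (l : List Char) : collapseRuns_B l = collapse2 none l := by
  generalize hn : l.length = n
  induction n using Nat.strong_induction_on generalizing l with
  | _ n ih =>
    cases l with
    | nil => simp [collapseRuns_B, collapse2]
    | cons c cs =>
      cases cs with
      | nil => simp [collapseRuns_B, runLen_B, collapse2]
      | cons x xs =>
        subst hn
        by_cases h : x = c
        · subst h
          have hr : runLen_B x (x :: xs) = runLen_B x xs + 1 := by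
            rw [runLen_B, if_pos rfl]
          rw [collapseRuns_B, hr]
          simp only [List.drop_succ_cons]
          have h1 : collapse2 none (x :: x :: xs) = x :: collapse2 (some (x, false)) (x :: xs) := by
            rw [collapse2, if_neg (by simp)]; simp [lastEq]
          have h2 : collapse2 (some (x, false)) (x :: xs) = x :: collapse2 (some (x, true)) xs := by
            rw [collapse2, if_neg (by simp)]; simp [lastEq]
          have hih := ih (xs.drop (runLen_B x xs)).length
            (by simp only [List.length_cons, List.length_drop]; omega)
            (xs.drop (runLen_B x xs)) rfl
          rw [h1, h2, collapse2_skip x xs,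
            collapse2_fresh _ _ _ (head_drop_runLen x xs), ← hih]
          simp
        · have hr : runLen_B c (x :: xs) = 0 := by rw [runLen_B, if_neg h]
          rw [collapseRuns_B, hr]
          simp only [List.drop_zero]
          have h1 : collapse2 none (c :: x :: xs) = c :: collapse2 (some (c, false)) (x :: xs) := by
            rw [collapse2, if_neg (by simp)]; simp [lastEq]
          have hih := ih (x :: xs).length (by simp) (x :: xs) rfl
          rw [h1, collapse2_fresh _ _ _ (by simp [h] : (x :: xs).head? ≠ some c), ← hih]
          simp

-- ===== VERDICT (by name: the statement is the Claim_ definition above) =====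
theorem postprocess_digits_spec : Claim_equal_postprocess_digits := by
  intro s _
  unfold Spec_postprocess_digits postprocess_digits postprocess_digits_alt
  simp only
  set d := s.toList.filter (fun ch => PySem.Chars.isdigit ch) with hd
  by_cases he : d = []
  · simp [he]
  · rw [if_neg he, if_neg he]
    rw [foldA]
    have hst : st2 ([] : List Char) = none := rfl
    rw [hst, List.nil_append, ← collapseRuns_eq]
    by_cases hl : 5 < (collapseRuns_B d).length
    · rw [if_pos hl, PySem.List.slice_to _ (by norm_num)]
      rfl
    · rw [if_neg hl, List.take_of_length_le (by omega)]
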